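-- pv_equiv track=rewrite | github.com/defects4c/agent_apr | swe_agent/single_shot_thought/defects4j.py | _parse_failing_tests
-- ===== SOURCE A (Python) =====
-- def _parse_failing_tests(content: str) -> dict:
--     """Parse the failing_tests file format:
--     --- test.Class::method
--     error message
--     \tat stack.trace.Line
--     """
--     fail_info = {}
--     tc_sig = None
--     for line in content.splitlines():
--         if line.startswith("--- "):
--             tc_name = line.split()[-1]
--             tc_sig = tc_name.replace("::", ".") + "()"
--             fail_info[tc_sig] = {"error_message": "", "stack_trace": ""}
--         elif tc_sig:
--             if line.startswith("\tat") or line.startswith("  at "):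
--                 fail_info[tc_sig]["stack_trace"] += line + "\n"
--             elif line.strip():
--                 fail_info[tc_sig]["error_message"] += line + "\n"
--     return fail_info
-- ===== SOURCE B (Python) =====
-- def _blocks(lines):
--     """Group lines into (header, body) blocks; lines before the first header are dropped."""
--     out = []
--     i = 0
--     n = len(lines)
--     while i < n and not lines[i].startswith("--- "):
--         i += 1
--     while i < n:
--         header = lines[i]
--         i += 1
--         body = []
--         while i < n and not lines[i].startswith("--- "):
--             body.append(lines[i])
--             i += 1
--         out.append((header, body))
--     return out
--
--
-- def _parse_failing_tests(content: str) -> dict: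
--     """Block-based re-implementation: split the file into per-test blocks first,
--     then classify each block's lines into stack trace vs error message and join."""
--     result = {}
--     for header, body in _blocks(content.splitlines()):
--         sig = header.split()[-1].replace("::", ".") + "()"
--         stack = [l for l in body if l.startswith("\tat") or l.startswith("  at ")]
--         errors = [l for l in body
--                   if not (l.startswith("\tat") or l.startswith("  at ")) and l.strip()]
--         result[sig] = {
--             "error_message": "".join(l + "\n" for l in errors),
--             "stack_trace": "".join(l + "\n" for l in stack),
--         }
--     return result
-- ===== Notes on version B (the rewrite author's own statement) =====
-- stated objective: alternative
-- what changed: A is a single stateful pass that accumulates strings by += inside a dict of dicts keyed by the current test signature; B first splits the file into per-test blocks (header + body lines), then builds each entry by filtering the block's body into stack/error lines and joining them, assigning per block.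
import Mathlib
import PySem

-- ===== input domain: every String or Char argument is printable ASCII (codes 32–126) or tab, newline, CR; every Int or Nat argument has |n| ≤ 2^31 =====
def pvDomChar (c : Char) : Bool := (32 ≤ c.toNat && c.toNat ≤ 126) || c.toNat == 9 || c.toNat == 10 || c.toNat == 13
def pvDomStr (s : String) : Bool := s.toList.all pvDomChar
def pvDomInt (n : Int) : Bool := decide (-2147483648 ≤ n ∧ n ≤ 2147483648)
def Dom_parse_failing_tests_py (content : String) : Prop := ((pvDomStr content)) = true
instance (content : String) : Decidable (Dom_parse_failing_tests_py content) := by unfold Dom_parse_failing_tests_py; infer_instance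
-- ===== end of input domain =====

-- B replaces A's single stateful pass (dict-of-dicts updated by += under the current signature)
-- by a block decomposition: group lines into per-test blocks, then filter/join each block's body.
-- Objective: alternative decomposition, same asymptotic cost.

-- shared helpers: the literal predicates/signature formula both Pythons contain
def pvIsHead (line : String) : Bool := PySem.Str.startswith line "--- "
def pvIsStack (line : String) : Bool :=
  PySem.Str.startswith line "\tat" || PySem.Str.startswith line "  at "
-- line.split()[-1].replace("::", ".") + "()"  (split()[-1] never raises: the line starts with "--- ")
def pvSig (header : String) : String :=
  PySem.Str.replace ((PySem.List.pyGet? (PySem.Str.split₀ header) (-1)).getD "") "::" "." ++ "()"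

-- ===== PORT A =====
-- one loop iteration of A: state = (fail_info, tc_sig)
def pvStepA (st : PySem.Dict String (PySem.Dict String String) × Option String) (line : String) :
    PySem.Dict String (PySem.Dict String String) × Option String :=
  if pvIsHead line then
    let tc_sig := pvSig line
    (st.1.insert tc_sig ((PySem.Dict.empty.insert "error_message" "").insert "stack_trace" ""),
     some tc_sig)
  else
    match st.2 with
    | some tc_sig =>
      if pvIsStack line then
        -- fail_info[tc_sig]["stack_trace"] += line + "\n"  (key always present: getD default unreachable)
        let inner := (st.1.get? tc_sig).getD PySem.Dict.empty
        (st.1.insert tc_sig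
          (inner.insert "stack_trace" ((inner.get? "stack_trace").getD "" ++ line ++ "\n")), st.2)
      else if PySem.Str.strip line ≠ "" then
        let inner := (st.1.get? tc_sig).getD PySem.Dict.empty
        (st.1.insert tc_sig
          (inner.insert "error_message" ((inner.get? "error_message").getD "" ++ line ++ "\n")), st.2)
      else st
    | none => st

def parse_failing_tests_py (content : String) : List (String × List (String × String)) :=
  (((PySem.Str.splitlines content).foldl pvStepA (PySem.Dict.empty, none)).1.items).map
    (fun p => (p.1, p.2.items))

-- ===== PORT B =====
-- _blocks: group into (header, body) blocks; preamble before the first header dropped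
def pvBlocks : List String → List (String × List String)
  | [] => []
  | l :: rest =>
    if pvIsHead l then
      (l, rest.takeWhile (fun x => !pvIsHead x)) :: pvBlocks (rest.dropWhile (fun x => !pvIsHead x))
    else pvBlocks rest
  termination_by ls => ls.length
  decreasing_by
    · simp only [List.length_cons]
      have := List.length_dropWhile_le (fun x => !pvIsHead x) rest
      omega
    · simp

def pvIsErr (l : String) : Bool := !pvIsStack l && !(PySem.Str.strip l == "")

def pvJoinLines (ls : List String) : String := PySem.Str.join "" (ls.map (fun l => l ++ "\n"))

-- per-block step: result[sig] = {"error_message": …, "stack_trace": …}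
def pvStepB (d : PySem.Dict String (PySem.Dict String String)) (b : String × List String) :
    PySem.Dict String (PySem.Dict String String) :=
  d.insert (pvSig b.1)
    ((PySem.Dict.empty.insert "error_message" (pvJoinLines (b.2.filter pvIsErr))).insert
      "stack_trace" (pvJoinLines (b.2.filter pvIsStack)))

def parse_failing_tests_py_alt (content : String) : List (String × List (String × String)) :=
  (((pvBlocks (PySem.Str.splitlines content)).foldl pvStepB PySem.Dict.empty).items).map
    (fun p => (p.1, p.2.items))

-- ===== PRECONDITION & SPEC =====
def Spec_parse_failing_tests_py (content : String) (out : List (String × List (String × String))) : Prop := out = parse_failing_tests_py_alt content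
instance (content : String) (out : List (String × List (String × String))) : Decidable (Spec_parse_failing_tests_py content out) := by unfold Spec_parse_failing_tests_py; infer_instance

-- ===== CLAIM (what is proved, stated in full; the proofs are below) =====
def Claim_equal_parse_failing_tests_py : Prop := ∀ (content : String), Dom_parse_failing_tests_py content → Spec_parse_failing_tests_py content (parse_failing_tests_py content)

-- ===== LEMMAS AND PROOFS =====

-- the inner two-key dict A maintains
def pvInner (e s : String) : PySem.Dict String String :=
  (PySem.Dict.empty.insert "error_message" e).insert "stack_trace" s

theorem pvInner_insert_stack (e s v : String) :
    (pvInner e s).insert "stack_trace" v = pvInner e v :=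
  PySem.Dict.insert_insert_self _ _ _ _

theorem pvInner_insert_err (e s v : String) :
    (pvInner e s).insert "error_message" v = pvInner v s := by
  apply PySem.Dict.ext
  simp [pvInner, PySem.Dict.insert, PySem.Dict.empty]

theorem pvInner_get_stack (e s : String) :
    (pvInner e s).get? "stack_trace" = some s :=
  PySem.Dict.get?_insert_self _ _ _

theorem pvInner_get_err (e s : String) :
    (pvInner e s).get? "error_message" = some e := by
  rw [pvInner, PySem.Dict.get?_insert_of_ne _ _ (by decide), PySem.Dict.get?_insert_self]

theorem pvJoinLines_nil : pvJoinLines [] = "" := rfl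

theorem pvOfList_newline (xs : List Char) :
    String.ofList ('\n' :: xs) = "\n" ++ String.ofList xs := by
  rw [show ('\n' :: xs) = ['\n'] ++ xs from rfl, String.ofList_append]

theorem pvJoinLines_cons (a : String) (l : List String) :
    pvJoinLines (a :: l) = a ++ "\n" ++ pvJoinLines l := by
  cases l with
  | nil => simp [pvJoinLines, PySem.Str.join, PySem.Chars.join, List.intercalate,
      String.ofList_append]
  | cons b t =>
    simp [pvJoinLines, PySem.Str.join, PySem.Chars.join, List.intercalate,
      String.ofList_append, String.ofList_toList, String.append_assoc]
    exact pvOfList_newline _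

theorem pvBlocks_cons_head (l : String) (rest : List String) (h : pvIsHead l = true) :
    pvBlocks (l :: rest)
      = (l, rest.takeWhile (fun x => !pvIsHead x))
          :: pvBlocks (rest.dropWhile (fun x => !pvIsHead x)) := by
  rw [pvBlocks.eq_def]
  simp [h]

theorem pvBlocks_cons_skip (l : String) (rest : List String) (h : pvIsHead l = false) :
    pvBlocks (l :: rest) = pvBlocks rest := by
  rw [pvBlocks.eq_def]
  simp [h]

-- main invariant: from an active block state, A's remaining fold equals B's fold over the
-- remaining blocks, with the current block's body joined onto the active entry
theorem pvMain (lines : List String) (d : PySem.Dict String (PySem.Dict String String))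
    (sig e s : String) :
    (lines.foldl pvStepA (d.insert sig (pvInner e s), some sig)).1
    = (pvBlocks (lines.dropWhile (fun x => !pvIsHead x))).foldl pvStepB
        (d.insert sig (pvInner
          (e ++ pvJoinLines ((lines.takeWhile (fun x => !pvIsHead x)).filter pvIsErr))
          (s ++ pvJoinLines ((lines.takeWhile (fun x => !pvIsHead x)).filter pvIsStack)))) := by
  match lines with
  | [] =>
    simp [pvJoinLines_nil, String.append_empty, pvBlocks]
  | l :: rest =>
    by_cases hh : pvIsHead l = true
    · rw [List.foldl_cons]
      have hstep : pvStepA (d.insert sig (pvInner e s), some sig) l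
          = ((d.insert sig (pvInner e s)).insert (pvSig l) (pvInner "" ""), some (pvSig l)) := by
        simp [pvStepA, hh, pvInner]
      rw [hstep, pvMain rest (d.insert sig (pvInner e s)) (pvSig l) "" ""]
      rw [List.takeWhile_cons, List.dropWhile_cons]
      simp only [hh, Bool.not_true, Bool.false_eq_true, if_false]
      rw [pvBlocks_cons_head l rest hh, List.foldl_cons]
      simp [pvStepB, pvInner, pvJoinLines_nil, String.append_empty, String.empty_append]
    · have hh' : pvIsHead l = false := by revert hh; cases pvIsHead l <;> simp
      rw [List.takeWhile_cons, List.dropWhile_cons]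
      simp only [hh', Bool.not_false, if_true]
      by_cases hs : pvIsStack l = true
      · rw [List.foldl_cons]
        have hstep : pvStepA (d.insert sig (pvInner e s), some sig) l
            = (d.insert sig (pvInner e (s ++ l ++ "\n")), some sig) := by
          simp [pvStepA, hh', hs, PySem.Dict.get?_insert_self, pvInner_get_stack,
            pvInner_insert_stack, PySem.Dict.insert_insert_self]
        rw [hstep, pvMain rest d sig e (s ++ l ++ "\n")]
        have he : pvIsErr l = false := by simp [pvIsErr, hs]
        rw [List.filter_cons_of_neg (by simp [he]), List.filter_cons_of_pos (by simp [hs]),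
          pvJoinLines_cons]
        simp [String.append_assoc]
      · have hs' : pvIsStack l = false := by revert hs; cases pvIsStack l <;> simp
        by_cases hb : PySem.Str.strip l = ""
        · rw [List.foldl_cons]
          have hstep : pvStepA (d.insert sig (pvInner e s), some sig) l
              = (d.insert sig (pvInner e s), some sig) := by
            simp [pvStepA, hh', hs', hb]
          rw [hstep, pvMain rest d sig e s]
          have he : pvIsErr l = false := by simp [pvIsErr, hb]
          rw [List.filter_cons_of_neg (by simp [he]), List.filter_cons_of_neg (by simp [hs'])]
        · rw [List.foldl_cons]
          have hstep : pvStepA (d.insert sig (pvInner e s), some sig) l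
              = (d.insert sig (pvInner (e ++ l ++ "\n") s), some sig) := by
            simp [pvStepA, hh', hs', hb, PySem.Dict.get?_insert_self, pvInner_get_err,
              pvInner_insert_err, PySem.Dict.insert_insert_self]
          rw [hstep, pvMain rest d sig (e ++ l ++ "\n") s]
          have he : pvIsErr l = true := by simp [pvIsErr, hs', hb]
          rw [List.filter_cons_of_pos (by simp [he]), List.filter_cons_of_neg (by simp [hs']),
            pvJoinLines_cons]
          simp [String.append_assoc]
  termination_by lines.length

-- top level: before the first header A skips lines, B's pvBlocks skips them too
theorem pvTop (lines : List String) :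
    (lines.foldl pvStepA (PySem.Dict.empty, none)).1
    = (pvBlocks lines).foldl pvStepB PySem.Dict.empty := by
  induction lines with
  | nil => simp [pvBlocks]
  | cons l rest ih =>
    by_cases hh : pvIsHead l = true
    · rw [List.foldl_cons]
      have hstep : pvStepA ((PySem.Dict.empty : PySem.Dict String (PySem.Dict String String)), none) l
          = (PySem.Dict.empty.insert (pvSig l) (pvInner "" ""), some (pvSig l)) := by
        simp [pvStepA, hh, pvInner]
      rw [hstep, pvMain rest PySem.Dict.empty (pvSig l) "" ""]
      rw [pvBlocks_cons_head l rest hh, List.foldl_cons]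
      simp [pvStepB, pvInner, String.empty_append]
    · have hh' : pvIsHead l = false := by revert hh; cases pvIsHead l <;> simp
      rw [List.foldl_cons]
      have hstep : pvStepA ((PySem.Dict.empty : PySem.Dict String (PySem.Dict String String)), none) l
          = (PySem.Dict.empty, none) := by
        simp [pvStepA, hh']
      rw [hstep, ih, pvBlocks_cons_skip l rest hh']

-- ===== VERDICT (by name: the statement is the Claim_ definition above) =====
theorem parse_failing_tests_py_spec : Claim_equal_parse_failing_tests_py := by
  intro content _
  unfold Spec_parse_failing_tests_py parse_failing_tests_py parse_failing_tests_py_alt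
  rw [pvTop]
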